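-- pv_equiv track=rewrite | github.com/dushyant60/Python | backtracking/partition_array_of_k_subset.py | isKPartitionPossible
-- ===== SOURCE A (Python) =====
-- def isKPartitionPossibleRec(arr, subsetSum, taken,
-- 							subset, K, N, curIdx, limitIdx):
-- 	if subsetSum[curIdx] == subset:
--
-- 		""" current index (K - 2) represents (K - 1)
-- 		subsets of equal sum last partition will
-- 		already remain with sum 'subset'"""
-- 		if (curIdx == K - 2):
-- 			return True
--
-- 		# recursive call for next subsetition
-- 		return isKPartitionPossibleRec(arr, subsetSum, taken,
-- 									subset, K, N, curIdx + 1 , N - 1)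
--
-- 	# start from limitIdx and include
-- 	# elements into current partition
-- 	for i in range(limitIdx, -1, -1):
--
-- 		# if already taken, continue
-- 		if (taken[i]):
-- 			continue
-- 		tmp = subsetSum[curIdx] + arr[i]
--
-- 		# if temp is less than subset, then only
-- 		# include the element and call recursively
-- 		if (tmp <= subset):
--
-- 			# mark the element and include into
-- 			# current partition sum
-- 			taken[i] = True
-- 			subsetSum[curIdx] += arr[i]
-- 			nxt = isKPartitionPossibleRec(arr, subsetSum, taken,
-- 										subset, K, N, curIdx, i - 1)
--
-- 			# after recursive call unmark the element and
-- 			# remove from subsetition sum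
-- 			taken[i] = False
-- 			subsetSum[curIdx] -= arr[i]
-- 			if (nxt):
-- 				return True
-- 	return False
--
-- def isKPartitionPossible(arr, N, K):
--
-- 	# If K is 1,
-- 	# then complete array will be our answer
-- 	if (K == 1):
-- 		return True
--
-- 	# If total number of partitions are more than N,
-- 	# then division is not possible
-- 	if (N < K):
-- 		return False
--
-- 	# if array sum is not divisible by K then
-- 	# we can't divide array into K partitions
-- 	sum = 0
-- 	for i in range(N):
-- 		sum += arr[i]
-- 	if (sum % K != 0):
-- 		return False
--
-- 	# the sum of each subset should be subset (= sum / K)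
-- 	subset = sum // K
-- 	subsetSum = [0] * K
-- 	taken = [0] * N
--
-- 	# Initialize sum of each subset from 0
-- 	for i in range(K):
-- 		subsetSum[i] = 0
--
-- 	# mark all elements as not taken
-- 	for i in range(N):
-- 		taken[i] = False
--
-- 	# initialize first subset sum as
-- 	# last element of array and mark that as taken
-- 	subsetSum[0] = arr[N - 1]
-- 	taken[N - 1] = True
--
-- 	# call recursive method to check
-- 	# K-substitution condition
-- 	return isKPartitionPossibleRec(arr, subsetSum, taken,
-- 								subset, K, N, 0, N - 1)
-- ===== SOURCE B (Python) =====
-- def isKPartitionPossible(arr, N, K):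
--     # Pure-functional backtracking over an immutable list of still-available
--     # elements with a position cutoff, instead of A's taken[] flags / subsetSum[]
--     # array / index limit with mutation-and-undo.
--     if K == 1:
--         return True
--     if N < K:
--         return False
--     total = sum(arr[:N])
--     if total % K != 0:
--         return False
--     subset = total // K
--
--     def solve(avail, cur, r, m):
--         # cur: sum of the subset being filled; r: subsets still to complete
--         # (including the current one); only avail[:m] may extend the current one.
--         if cur == subset:
--             return True if r == 2 else solve(avail, 0, r - 1, len(avail))
--         for p in range(m - 1, -1, -1):
--             v = avail[p]
--             if cur + v <= subset:
--                 if solve(avail[:p] + avail[p + 1:], cur + v, r, p):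
--                     return True
--         return False
--
--     return solve(arr[:N - 1], arr[N - 1], K, N - 1)
-- ===== Notes on version B (the rewrite author's own statement) =====
-- stated objective: alternative
-- what changed: Replaces A's mutate-and-undo backtracking over a taken[] flag array, a subsetSum[] array indexed by curIdx and an index limit (skipping taken slots on every scan) by a pure-functional recursion over an immutable list of the still-available elements with a position cutoff and a remaining-subsets counter, so taken elements disappear from the structure instead of being skipped.
-- outside the precondition, e.g. on isKPartitionPossible([1], 1, -2): A returns False, B returns False
import Mathlib
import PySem

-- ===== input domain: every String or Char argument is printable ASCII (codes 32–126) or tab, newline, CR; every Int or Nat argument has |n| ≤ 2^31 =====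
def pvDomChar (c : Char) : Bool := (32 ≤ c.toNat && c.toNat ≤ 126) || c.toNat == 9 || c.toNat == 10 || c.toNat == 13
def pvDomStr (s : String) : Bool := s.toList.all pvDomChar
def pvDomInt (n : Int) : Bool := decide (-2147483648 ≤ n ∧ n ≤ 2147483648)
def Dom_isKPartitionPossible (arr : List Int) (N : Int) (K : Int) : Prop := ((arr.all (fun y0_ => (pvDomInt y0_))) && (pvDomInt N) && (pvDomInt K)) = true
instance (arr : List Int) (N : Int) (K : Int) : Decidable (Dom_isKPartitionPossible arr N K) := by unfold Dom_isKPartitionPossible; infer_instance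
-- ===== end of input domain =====

-- B replaces A's mutate-and-undo backtracking (taken[] flags, subsetSum[] array, index limit)
-- by a pure-functional recursion over the immutable list of still-available elements with a
-- position cutoff and a remaining-subsets counter (objective: alternative, same search cost).

-- ===== PORT A =====
-- termination helper cited by the port's decreasing_by: marking an untaken slot shrinks the untaken count
theorem count_false_set_true (l : List Bool) (n : Nat) (h : l[n]? = some false) :
    (l.set n true).count false < l.count false := by
  induction l generalizing n with
  | nil => simp at h
  | cons a t ih =>
    cases n with
    | zero =>
      simp only [List.getElem?_cons_zero, Option.some.injEq] at h
      subst h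
      simp
    | succ m =>
      simp only [List.getElem?_cons_succ] at h
      simpa [List.count_cons] using ih m h

mutual
-- isKPartitionPossibleRec: the branch 'if subsetSum[curIdx] == subset' and the close/extend logic;
-- the guard hc is Python's subsetSum[curIdx] index check (out of range = IndexError, unreachable under Pre_)
def pvRecA (arr subsetSum : List Int) (taken : List Bool) (subset K N curIdx limitIdx : Int) : Bool :=
  if hc : 0 ≤ curIdx ∧ curIdx.toNat < subsetSum.length then
    if (PySem.List.pyGet? subsetSum curIdx).getD 0 = subset then
      if curIdx = K - 2 then true
      else pvRecA arr subsetSum taken subset K N (curIdx + 1) (N - 1)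
    else if limitIdx < 0 then false   -- for i in range(limitIdx, -1, -1): empty range
    else pvLoopA arr subsetSum taken subset K N curIdx limitIdx
  else false
  termination_by (taken.count false, subsetSum.length - curIdx.toNat, (limitIdx + 2).toNat)
  decreasing_by
  · exact Prod.Lex.right _ (Prod.Lex.left _ _ (by omega))
  · exact Prod.Lex.right _ (Prod.Lex.right _ (by omega))

-- the 'for i in range(limitIdx, -1, -1)' loop of isKPartitionPossibleRec, counting i down;
-- taken[i]=True / subsetSum[curIdx]+=arr[i] become .set, the unmark/undo is resuming with the old lists
def pvLoopA (arr subsetSum : List Int) (taken : List Bool) (subset K N curIdx i : Int) : Bool :=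
  if _hi : i < 0 then false
  else
    match ht : PySem.List.pyGet? taken i with
    | none => false   -- IndexError, unreachable under Pre_
    | some true => pvLoopA arr subsetSum taken subset K N curIdx (i - 1)
    | some false =>
      let v := (PySem.List.pyGet? arr i).getD 0
      let cur := (PySem.List.pyGet? subsetSum curIdx).getD 0
      if cur + v ≤ subset then
        (if pvRecA arr (subsetSum.set curIdx.toNat (cur + v)) (taken.set i.toNat true) subset K N curIdx (i - 1)
         then true
         else pvLoopA arr subsetSum taken subset K N curIdx (i - 1))
      else pvLoopA arr subsetSum taken subset K N curIdx (i - 1)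
  termination_by (taken.count false, subsetSum.length - curIdx.toNat, (i + 1).toNat)
  decreasing_by
  · exact Prod.Lex.right _ (Prod.Lex.right _ (by omega))
  · refine Prod.Lex.left _ _ ?_
    apply count_false_set_true
    rw [PySem.List.pyGet?_of_nonneg taken (by omega : (0:Int) ≤ i)] at ht
    exact ht
  · exact Prod.Lex.right _ (Prod.Lex.right _ (by omega))
  · exact Prod.Lex.right _ (Prod.Lex.right _ (by omega))
end

def isKPartitionPossible (arr : List Int) (N : Int) (K : Int) : Bool :=
  if K = 1 then true
  else if N < K then false
  else
    -- sum = 0; for i in range(N): sum += arr[i]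
    let s := (PySem.List.pyRange 0 N 1).foldl (fun acc i => acc + (PySem.List.pyGet? arr i).getD 0) 0
    if PySem.Int.mod s K ≠ 0 then false
    else
      let subset := PySem.Int.floordiv s K
      -- subsetSum = [0]*K; (re-initialising loops are no-ops); subsetSum[0] = arr[N-1]
      let subsetSum := (List.replicate K.toNat (0 : Int)).set 0 ((PySem.List.pyGet? arr (N - 1)).getD 0)
      -- taken = [False]*N; taken[N-1] = True
      let taken := (List.replicate N.toNat false).set (N - 1).toNat true
      pvRecA arr subsetSum taken subset K N 0 (N - 1)

-- ===== PORT B =====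
mutual
-- solve(avail, cur, r, m): close the current subset when its sum hits the target, else extend it;
-- the 'r ≤ 2' guard returns what Python returns for every r reachable from the entry (r ≥ 2)
def pvSolveB (subset : Int) (avail : List Int) (cur r : Int) (m : Nat) : Bool :=
  if cur = subset then
    (if r ≤ 2 then decide (r = 2)
     else pvSolveB subset avail 0 (r - 1) avail.length)
  else pvLoopB subset avail cur r m
  termination_by (avail.length, r.toNat, m + 1)
  decreasing_by
  · exact Prod.Lex.right _ (Prod.Lex.left _ _ (by omega))
  · exact Prod.Lex.right _ (Prod.Lex.right _ (by omega))

-- for p in range(m-1, -1, -1): try avail[p]; avail[:p]+avail[p+1:] is take p ++ drop (p+1) (exact: 0 ≤ p < len)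
def pvLoopB (subset : Int) (avail : List Int) (cur r : Int) (p : Nat) : Bool :=
  match p with
  | 0 => false
  | q + 1 =>
    if hq : q < avail.length then
      let v := avail[q]
      if cur + v ≤ subset then
        (if pvSolveB subset (avail.take q ++ avail.drop (q + 1)) (cur + v) r q then true
         else pvLoopB subset avail cur r q)
      else pvLoopB subset avail cur r q
    else false   -- IndexError, unreachable: every call has p ≤ len(avail)
  termination_by (avail.length, r.toNat, p)
  decreasing_by
  · refine Prod.Lex.left _ _ ?_
    simp only [List.length_append, List.length_take, List.length_drop]
    omega
  · exact Prod.Lex.right _ (Prod.Lex.right _ (by omega))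
  · exact Prod.Lex.right _ (Prod.Lex.right _ (by omega))
end

def isKPartitionPossible_alt (arr : List Int) (N : Int) (K : Int) : Bool :=
  if K = 1 then true
  else if N < K then false
  else
    let total := (PySem.List.slice arr none (some N)).sum   -- sum(arr[:N])
    if PySem.Int.mod total K ≠ 0 then false
    else
      let subset := PySem.Int.floordiv total K
      let avail := PySem.List.slice arr none (some (N - 1))  -- arr[:N-1]
      pvSolveB subset avail ((PySem.List.pyGet? arr (N - 1)).getD 0) K (N - 1).toNat

-- ===== PRECONDITION & SPEC =====
-- Pre_ excludes exactly (a) inputs where A raises: N > len(arr) past the guards (IndexError in the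
-- sum loop or at arr[N-1]), K = 0 past the guards (ZeroDivisionError), and K < 0 with K ≤ N and the
-- sum divisible by K (IndexError on the empty subsetSum); and (b) the remaining K < 0, K ≤ N inputs,
-- where A survives only via the accidental divisibility test on a negative modulus and returns False.
def Pre_isKPartitionPossible (arr : List Int) (N : Int) (K : Int) : Prop :=
  K = 1 ∨ N < K ∨ (2 ≤ K ∧ N ≤ (arr.length : Int))
instance (arr : List Int) (N : Int) (K : Int) : Decidable (Pre_isKPartitionPossible arr N K) := by
  unfold Pre_isKPartitionPossible; infer_instance

def pvWitness_isKPartitionPossible : List Int × Int × Int := ([2, 1, 3, 2], 4, 2)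

def Spec_isKPartitionPossible (arr : List Int) (N : Int) (K : Int) (out : Bool) : Prop := out = isKPartitionPossible_alt arr N K
instance (arr : List Int) (N : Int) (K : Int) (out : Bool) : Decidable (Spec_isKPartitionPossible arr N K out) := by unfold Spec_isKPartitionPossible; infer_instance

-- ===== CLAIM (what is proved, stated in full; the proofs are below) =====
def Claim_equal_isKPartitionPossible : Prop := ∀ (arr : List Int) (N : Int) (K : Int), Dom_isKPartitionPossible arr N K → Pre_isKPartitionPossible arr N K → Spec_isKPartitionPossible arr N K (isKPartitionPossible arr N K)

-- ===== LEMMAS AND PROOFS =====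

-- the list of still-available elements: entries of arr at the positions taken does not mark
def pvAvail : List Int → List Bool → List Int
  | _, [] => []
  | [], _ :: _ => []
  | a :: arr, t :: tk => if t then pvAvail arr tk else a :: pvAvail arr tk

-- how many of the positions 0..limit are still available
def pvM (tk : List Bool) (limit : Int) : Nat := (tk.take (limit + 1).toNat).count false

theorem pvAvail_length (arr : List Int) (tk : List Bool) (h : tk.length ≤ arr.length) :
    (pvAvail arr tk).length = tk.count false := by
  induction tk generalizing arr with
  | nil => simp [pvAvail]
  | cons t tk ih =>
    cases arr with
    | nil => simp at h
    | cons a arr =>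
      simp only [List.length_cons, Nat.add_le_add_iff_right] at h
      cases t <;> simp [pvAvail, ih arr h]

theorem pvAvail_get (arr : List Int) (tk : List Bool) (n : Nat)
    (hn : n < tk.length) (h : tk.length ≤ arr.length) (hf : tk[n]? = some false) :
    (pvAvail arr tk)[(tk.take n).count false]? = arr[n]? := by
  induction tk generalizing arr n with
  | nil => simp at hn
  | cons t tk ih =>
    cases arr with
    | nil => simp at h
    | cons a arr =>
      simp only [List.length_cons, Nat.add_le_add_iff_right] at h
      cases n with
      | zero =>
        simp only [List.getElem?_cons_zero, Option.some.injEq] at hf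
        subst hf
        simp [pvAvail]
      | succ m =>
        simp only [List.getElem?_cons_succ] at hf
        simp only [List.length_cons, Nat.add_lt_add_iff_right] at hn
        cases t with
        | true => simpa [pvAvail, List.count_cons] using ih arr m hn h hf
        | false => simpa [pvAvail, List.count_cons] using ih arr m hn h hf

theorem pvAvail_set (arr : List Int) (tk : List Bool) (n : Nat)
    (hn : n < tk.length) (hf : tk[n]? = some false) :
    pvAvail arr (tk.set n true) = (pvAvail arr tk).eraseIdx ((tk.take n).count false) := by
  induction tk generalizing arr n with
  | nil => simp at hn
  | cons t tk ih =>
    cases arr with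
    | nil => cases n <;> simp [pvAvail]
    | cons a arr =>
      cases n with
      | zero =>
        simp only [List.getElem?_cons_zero, Option.some.injEq] at hf
        subst hf
        simp [pvAvail]
      | succ m =>
        simp only [List.getElem?_cons_succ] at hf
        simp only [List.length_cons, Nat.add_lt_add_iff_right] at hn
        cases t with
        | true => simp [pvAvail, ih arr m hn hf]
        | false => simp [pvAvail, ih arr m hn hf, List.eraseIdx_cons_succ]

theorem count_take_lt (tk : List Bool) (n : Nat) (hf : tk[n]? = some false) :
    (tk.take n).count false < tk.count false := by
  induction tk generalizing n with
  | nil => simp at hf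
  | cons t tk ih =>
    cases n with
    | zero =>
      simp only [List.getElem?_cons_zero, Option.some.injEq] at hf
      subst hf
      simp
    | succ m =>
      simp only [List.getElem?_cons_succ] at hf
      cases t <;> simp <;> exact ih m hf

theorem count_take_succ (tk : List Bool) (n : Nat) (b : Bool) (hf : tk[n]? = some b) :
    (tk.take (n + 1)).count false = (tk.take n).count false + (if b = false then 1 else 0) := by
  rw [List.take_add_one, hf]
  cases b <;> simp [List.count_append]

theorem replicate_set_last (n : Nat) :
    (List.replicate (n + 1) false).set n true = List.replicate n false ++ [true] := by
  induction n with
  | zero => simp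
  | succ m ih =>
    rw [List.replicate_succ, List.set_cons_succ, ih, List.replicate_succ, List.cons_append]

theorem pvAvail_entry (arr : List Int) (n : Nat) (h : n + 1 ≤ arr.length) :
    pvAvail arr (List.replicate n false ++ [true]) = arr.take n := by
  induction n generalizing arr with
  | zero =>
    cases arr with
    | nil => simp at h
    | cons a arr => simp [pvAvail]
  | succ m ih =>
    cases arr with
    | nil => simp at h
    | cons a arr =>
      simp only [List.length_cons, Nat.add_le_add_iff_right] at h
      simp [List.replicate_succ, pvAvail, ih arr h]

theorem sum_fold_nat (arr : List Int) (n : Nat) (h : n ≤ arr.length) :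
    (List.range n).foldl (fun acc k => acc + (PySem.List.pyGet? arr ((k : Nat) : Int)).getD 0) 0
      = (arr.take n).sum := by
  induction n with
  | zero => simp
  | succ m ih =>
    have hm : m < arr.length := by omega
    rw [List.range_succ, List.foldl_append, ih (by omega), List.take_add_one,
        List.getElem?_eq_getElem hm]
    simp only [List.foldl_cons, List.foldl_nil, PySem.List.pyGet?_natCast,
      List.getElem?_eq_getElem hm, Option.getD_some, Option.toList_some, List.sum_append,
      List.sum_cons, List.sum_nil, add_zero]

-- the invariant tying an A-state to its B-image
def pvInv (arr : List Int) (K N : Int) (ss : List Int) (tk : List Bool) (c : Int) : Prop :=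
  2 ≤ K ∧ 2 ≤ N ∧ 0 ≤ c ∧ c ≤ K - 2 ∧ ss.length = K.toNat ∧ tk.length = N.toNat ∧
  N.toNat ≤ arr.length ∧ (∀ j : Nat, c.toNat < j → j < ss.length → ss[j]? = some 0)

theorem pvRecA_eq_solveB (arr : List Int) (subset K N : Int)
    (ss : List Int) (tk : List Bool) (c L : Int) :
    pvInv arr K N ss tk c → -1 ≤ L → L ≤ N - 1 →
    pvRecA arr ss tk subset K N c L
      = pvSolveB subset (pvAvail arr tk) ((ss[c.toNat]?).getD 0) (K - c) (pvM tk L) := by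
  refine pvRecA.induct arr subset K N
    (fun ss tk c L => pvInv arr K N ss tk c → -1 ≤ L → L ≤ N - 1 →
      pvRecA arr ss tk subset K N c L
        = pvSolveB subset (pvAvail arr tk) ((ss[c.toNat]?).getD 0) (K - c) (pvM tk L))
    (fun ss tk c i => pvInv arr K N ss tk c → -1 ≤ i → i ≤ N - 1 →
      pvLoopA arr ss tk subset K N c i
        = pvLoopB subset (pvAvail arr tk) ((ss[c.toNat]?).getD 0) (K - c) (pvM tk i))
    ?_ ?_ ?_ ?_ ?_ ?_ ?_ ?_ ?_ ?_ ?_ ss tk c L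
  · -- case 1: subsetSum[curIdx] == subset, curIdx == K-2 : True
    intro ss tk L hc heq hInv _ _
    obtain ⟨hK, hN, hc0, hcK, hssl, htkl, hNlen, hz⟩ := hInv
    have hcur : (ss[(K - 2).toNat]?).getD 0 = subset := by
      rw [← PySem.List.pyGet?_of_nonneg ss (by omega : (0:Int) ≤ K - 2)]; exact heq
    rw [pvRecA, dif_pos hc, if_pos heq, if_pos rfl, pvSolveB, if_pos hcur,
        if_pos (by omega : K - (K - 2) ≤ 2)]
    simp [show K - (K - 2) = 2 by ring]
  · -- case 2: subsetSum[curIdx] == subset, curIdx ≠ K-2 : next subset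
    intro ss tk c L hc heq hne ih hInv _ _
    obtain ⟨hK, hN, hc0, hcK, hssl, htkl, hNlen, hz⟩ := hInv
    have hcK' : c < K - 2 := lt_of_le_of_ne hcK (by exact fun h => hne h)
    have hcur : (ss[c.toNat]?).getD 0 = subset := by
      rw [← PySem.List.pyGet?_of_nonneg ss hc0]; exact heq
    have hInv' : pvInv arr K N ss tk (c + 1) :=
      ⟨hK, hN, by omega, by omega, hssl, htkl, hNlen,
       fun j h1 h2 => hz j (by omega) h2⟩
    have h0 : ss[(c + 1).toNat]? = some 0 := hz (c + 1).toNat (by omega) (by omega)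
    have hlen : (pvAvail arr tk).length = tk.count false :=
      pvAvail_length arr tk (by omega)
    have hpm : pvM tk (N - 1) = (pvAvail arr tk).length := by
      rw [hlen]
      simp only [pvM, show (N - 1 + 1).toNat = N.toNat by omega, ← htkl, List.take_length]
    rw [pvRecA, dif_pos hc, if_pos heq, if_neg hne,
        ih hInv' (by omega) (by omega), h0, hpm]
    conv_rhs => rw [pvSolveB]
    rw [if_pos hcur, if_neg (by omega : ¬ K - c ≤ 2)]
    simp [show K - (c + 1) = K - c - 1 from by ring]
  · -- case 3: not closed, empty loop range
    intro ss tk c L hc hne hL hInv hL1 _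
    obtain ⟨hK, hN, hc0, hcK, hssl, htkl, hNlen, hz⟩ := hInv
    have hcur : ¬ (ss[c.toNat]?).getD 0 = subset := by
      rw [← PySem.List.pyGet?_of_nonneg ss hc0]; exact hne
    have hm : pvM tk L = 0 := by
      simp [pvM, show (L + 1).toNat = 0 by omega]
    rw [pvRecA, dif_pos hc, if_neg hne, if_pos hL, pvSolveB, if_neg hcur, hm, pvLoopB]
  · -- case 4: not closed, enter the loop
    intro ss tk c L hc hne hL ih hInv hL1 hL2
    have hc0 : (0:Int) ≤ c := hc.1
    have hcur : ¬ (ss[c.toNat]?).getD 0 = subset := by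
      rw [← PySem.List.pyGet?_of_nonneg ss hc0]; exact hne
    rw [pvRecA, dif_pos hc, if_neg hne, if_neg hL, pvSolveB, if_neg hcur]
    exact ih hInv (by omega) hL2
  · -- case 5: curIdx out of range (unreachable under the invariant)
    intro ss tk c L h hInv _ _
    obtain ⟨hK, hN, hc0, hcK, hssl, htkl, hNlen, hz⟩ := hInv
    exact absurd ⟨hc0, by omega⟩ h
  · -- case 6: i < 0, loop finished
    intro ss tk c i hi hInv hi1 _
    have hm : pvM tk i = 0 := by
      simp [pvM, show (i + 1).toNat = 0 by omega]
    rw [pvLoopA, dif_pos hi, hm, pvLoopB]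
  · -- case 7: taken[i] IndexError (unreachable under the invariant)
    intro ss tk c i hi ht hInv _ hi2
    obtain ⟨hK, hN, hc0, hcK, hssl, htkl, hNlen, hz⟩ := hInv
    rw [PySem.List.pyGet?_of_nonneg tk (by omega : (0:Int) ≤ i),
        List.getElem?_eq_getElem (by omega : i.toNat < tk.length)] at ht
    exact absurd ht (by simp)
  · -- case 8: taken[i] set, skip
    intro ss tk c i hi ht ih hInv _ hi2
    obtain ⟨hK, hN, hc0, hcK, hssl, htkl, hNlen, hz⟩ := hInv
    have hf : tk[i.toNat]? = some true := by
      rw [← PySem.List.pyGet?_of_nonneg tk (by omega : (0:Int) ≤ i)]; exact ht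
    have hm : pvM tk i = pvM tk (i - 1) := by
      simp only [pvM, show (i + 1).toNat = i.toNat + 1 by omega,
        show (i - 1 + 1).toNat = i.toNat by omega]
      rw [count_take_succ tk i.toNat true hf]
      simp
    rw [pvLoopA, dif_neg hi, ht, hm]
    exact ih ⟨hK, hN, hc0, hcK, hssl, htkl, hNlen, hz⟩ (by omega) (by omega)
  · -- case 9: place arr[i], recursion succeeds
    intro ss tk c i hi ht v cur hcond hnxt ih hInv _ hi2
    obtain ⟨hK, hN, hc0, hcK, hssl, htkl, hNlen, hz⟩ := hInv
    have hcur : (PySem.List.pyGet? ss c).getD 0 = (ss[c.toNat]?).getD 0 := by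
      rw [PySem.List.pyGet?_of_nonneg ss hc0]
    have hv : v = (PySem.List.pyGet? arr i).getD 0 := rfl
    have hcu : cur = (PySem.List.pyGet? ss c).getD 0 := rfl
    rw [hv, hcu, hcur] at hcond hnxt ih
    have hn : i.toNat < tk.length := by omega
    have hf : tk[i.toNat]? = some false := by
      rw [← PySem.List.pyGet?_of_nonneg tk (by omega : (0:Int) ≤ i)]; exact ht
    have hql : (tk.take i.toNat).count false < (pvAvail arr tk).length := by
      rw [pvAvail_length arr tk (by omega)]; exact count_take_lt tk i.toNat hf
    have hvq : (pvAvail arr tk)[(tk.take i.toNat).count false] = (PySem.List.pyGet? arr i).getD 0 := by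
      have := pvAvail_get arr tk i.toNat hn (by omega) hf
      rw [List.getElem?_eq_getElem hql,
          List.getElem?_eq_getElem (by omega : i.toNat < arr.length)] at this
      rw [Option.some.inj this, PySem.List.pyGet?_of_nonneg arr (by omega : (0:Int) ≤ i),
          List.getElem?_eq_getElem (by omega : i.toNat < arr.length)]
      rfl
    have hm : pvM tk i = (tk.take i.toNat).count false + 1 := by
      simp only [pvM, show (i + 1).toNat = i.toNat + 1 by omega]
      rw [count_take_succ tk i.toNat false hf]; rfl
    have epv : pvAvail arr (tk.set i.toNat true)
        = (pvAvail arr tk).take ((tk.take i.toNat).count false)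
          ++ (pvAvail arr tk).drop ((tk.take i.toNat).count false + 1) := by
      rw [pvAvail_set arr tk i.toNat hn hf, List.eraseIdx_eq_take_drop_succ]
    have ecur : ((ss.set c.toNat ((ss[c.toNat]?).getD 0 + (PySem.List.pyGet? arr i).getD 0))[c.toNat]?).getD 0
        = (ss[c.toNat]?).getD 0 + (PySem.List.pyGet? arr i).getD 0 := by
      rw [List.getElem?_set_self (by omega : c.toNat < ss.length)]; rfl
    have em : pvM (tk.set i.toNat true) (i - 1) = (tk.take i.toNat).count false := by
      simp only [pvM, show (i - 1 + 1).toNat = i.toNat by omega, List.take_set]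
      rw [List.set_eq_of_length_le (by rw [List.length_take]; omega)]
    have hInv' : pvInv arr K N
        (ss.set c.toNat ((ss[c.toNat]?).getD 0 + (PySem.List.pyGet? arr i).getD 0))
        (tk.set i.toNat true) c :=
      ⟨hK, hN, hc0, hcK, by simp [hssl], by simp [htkl], hNlen,
       fun j h1 h2 => by
        rw [List.getElem?_set_ne (by omega : c.toNat ≠ j)]
        exact hz j h1 (by simpa using h2)⟩
    have ihv := ih hInv' (by omega) (by omega)
    rw [epv, ecur, em] at ihv
    rw [pvLoopA, dif_neg hi, ht]
    simp only []
    rw [hcur, hm, pvLoopB, dif_pos hql]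
    simp only [hvq]
    rw [if_pos hcond, if_pos hcond, ← ihv, hnxt]
    simp
  · -- case 10: place arr[i], recursion fails, keep scanning
    intro ss tk c i hi ht v cur hcond hnxt ih ih2 hInv _ hi2
    obtain ⟨hK, hN, hc0, hcK, hssl, htkl, hNlen, hz⟩ := hInv
    have hcur : (PySem.List.pyGet? ss c).getD 0 = (ss[c.toNat]?).getD 0 := by
      rw [PySem.List.pyGet?_of_nonneg ss hc0]
    have hv : v = (PySem.List.pyGet? arr i).getD 0 := rfl
    have hcu : cur = (PySem.List.pyGet? ss c).getD 0 := rfl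
    rw [hv, hcu, hcur] at hcond hnxt ih
    have hn : i.toNat < tk.length := by omega
    have hf : tk[i.toNat]? = some false := by
      rw [← PySem.List.pyGet?_of_nonneg tk (by omega : (0:Int) ≤ i)]; exact ht
    have hql : (tk.take i.toNat).count false < (pvAvail arr tk).length := by
      rw [pvAvail_length arr tk (by omega)]; exact count_take_lt tk i.toNat hf
    have hvq : (pvAvail arr tk)[(tk.take i.toNat).count false] = (PySem.List.pyGet? arr i).getD 0 := by
      have := pvAvail_get arr tk i.toNat hn (by omega) hf
      rw [List.getElem?_eq_getElem hql,
          List.getElem?_eq_getElem (by omega : i.toNat < arr.length)] at this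
      rw [Option.some.inj this, PySem.List.pyGet?_of_nonneg arr (by omega : (0:Int) ≤ i),
          List.getElem?_eq_getElem (by omega : i.toNat < arr.length)]
      rfl
    have hm : pvM tk i = (tk.take i.toNat).count false + 1 := by
      simp only [pvM, show (i + 1).toNat = i.toNat + 1 by omega]
      rw [count_take_succ tk i.toNat false hf]; rfl
    have epv : pvAvail arr (tk.set i.toNat true)
        = (pvAvail arr tk).take ((tk.take i.toNat).count false)
          ++ (pvAvail arr tk).drop ((tk.take i.toNat).count false + 1) := by
      rw [pvAvail_set arr tk i.toNat hn hf, List.eraseIdx_eq_take_drop_succ]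
    have ecur : ((ss.set c.toNat ((ss[c.toNat]?).getD 0 + (PySem.List.pyGet? arr i).getD 0))[c.toNat]?).getD 0
        = (ss[c.toNat]?).getD 0 + (PySem.List.pyGet? arr i).getD 0 := by
      rw [List.getElem?_set_self (by omega : c.toNat < ss.length)]; rfl
    have em : pvM (tk.set i.toNat true) (i - 1) = (tk.take i.toNat).count false := by
      simp only [pvM, show (i - 1 + 1).toNat = i.toNat by omega, List.take_set]
      rw [List.set_eq_of_length_le (by rw [List.length_take]; omega)]
    have hInv' : pvInv arr K N
        (ss.set c.toNat ((ss[c.toNat]?).getD 0 + (PySem.List.pyGet? arr i).getD 0))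
        (tk.set i.toNat true) c :=
      ⟨hK, hN, hc0, hcK, by simp [hssl], by simp [htkl], hNlen,
       fun j h1 h2 => by
        rw [List.getElem?_set_ne (by omega : c.toNat ≠ j)]
        exact hz j h1 (by simpa using h2)⟩
    have ihv := ih hInv' (by omega) (by omega)
    rw [epv, ecur, em] at ihv
    have hm' : pvM tk (i - 1) = (tk.take i.toNat).count false := by
      simp only [pvM, show (i - 1 + 1).toNat = i.toNat by omega]
    have ih2v := ih2 ⟨hK, hN, hc0, hcK, hssl, htkl, hNlen, hz⟩ (by omega) (by omega)
    rw [hm'] at ih2v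
    rw [pvLoopA, dif_neg hi, ht]
    simp only []
    rw [hcur, hm, pvLoopB, dif_pos hql]
    simp only [hvq]
    rw [if_pos hcond, if_pos hcond, ← ihv, ih2v]
  · -- case 11: arr[i] does not fit, keep scanning
    intro ss tk c i hi ht v cur hcond ih2 hInv _ hi2
    obtain ⟨hK, hN, hc0, hcK, hssl, htkl, hNlen, hz⟩ := hInv
    have hcur : (PySem.List.pyGet? ss c).getD 0 = (ss[c.toNat]?).getD 0 := by
      rw [PySem.List.pyGet?_of_nonneg ss hc0]
    have hv : v = (PySem.List.pyGet? arr i).getD 0 := rfl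
    have hcu : cur = (PySem.List.pyGet? ss c).getD 0 := rfl
    rw [hv, hcu, hcur] at hcond
    have hn : i.toNat < tk.length := by omega
    have hf : tk[i.toNat]? = some false := by
      rw [← PySem.List.pyGet?_of_nonneg tk (by omega : (0:Int) ≤ i)]; exact ht
    have hql : (tk.take i.toNat).count false < (pvAvail arr tk).length := by
      rw [pvAvail_length arr tk (by omega)]; exact count_take_lt tk i.toNat hf
    have hvq : (pvAvail arr tk)[(tk.take i.toNat).count false] = (PySem.List.pyGet? arr i).getD 0 := by
      have := pvAvail_get arr tk i.toNat hn (by omega) hf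
      rw [List.getElem?_eq_getElem hql,
          List.getElem?_eq_getElem (by omega : i.toNat < arr.length)] at this
      rw [Option.some.inj this, PySem.List.pyGet?_of_nonneg arr (by omega : (0:Int) ≤ i),
          List.getElem?_eq_getElem (by omega : i.toNat < arr.length)]
      rfl
    have hm : pvM tk i = (tk.take i.toNat).count false + 1 := by
      simp only [pvM, show (i + 1).toNat = i.toNat + 1 by omega]
      rw [count_take_succ tk i.toNat false hf]; rfl
    have hm' : pvM tk (i - 1) = (tk.take i.toNat).count false := by
      simp only [pvM, show (i - 1 + 1).toNat = i.toNat by omega]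
    have ih2v := ih2 ⟨hK, hN, hc0, hcK, hssl, htkl, hNlen, hz⟩ (by omega) (by omega)
    rw [hm'] at ih2v
    rw [pvLoopA, dif_neg hi, ht]
    simp only []
    rw [hcur, hm, pvLoopB, dif_pos hql]
    simp only [hvq]
    rw [if_neg hcond, if_neg hcond, ih2v]

theorem sum_fold_int (arr : List Int) (N : Int) :
    (PySem.List.pyRange 0 N 1).foldl (fun acc i => acc + (PySem.List.pyGet? arr i).getD 0) 0
      = (List.range N.toNat).foldl (fun acc k => acc + (PySem.List.pyGet? arr ((k : Nat) : Int)).getD 0) 0 := by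
  rw [PySem.List.pyRange_one, List.foldl_map]
  simp

-- ===== VERDICT (by name: the statement is the Claim_ definition above) =====
theorem isKPartitionPossible_spec : Claim_equal_isKPartitionPossible := by
  intro arr N K _hDom hPre
  unfold Spec_isKPartitionPossible
  by_cases hK1 : K = 1
  · simp [isKPartitionPossible, isKPartitionPossible_alt, hK1]
  by_cases hNK : N < K
  · simp [isKPartitionPossible, isKPartitionPossible_alt, hK1, hNK]
  have hK : 2 ≤ K := by
    rcases hPre with h | h | h
    · exact absurd h hK1
    · exact absurd h hNK
    · exact h.1
  have hNlen : N.toNat ≤ arr.length := by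
    rcases hPre with h | h | h
    · exact absurd h hK1
    · exact absurd h hNK
    · omega
  have hN2 : 2 ≤ N := by omega
  simp only [isKPartitionPossible, isKPartitionPossible_alt, if_neg hK1, if_neg hNK]
  rw [sum_fold_int arr N, sum_fold_nat arr N.toNat hNlen,
      PySem.List.slice_to arr (by omega : (0:Int) ≤ N)]
  by_cases hmod : PySem.Int.mod (arr.take N.toNat).sum K ≠ 0
  · simp only [if_pos hmod]
  · simp only [if_neg hmod]
    set subset := PySem.Int.floordiv (arr.take N.toNat).sum K with hsub
    set last := (PySem.List.pyGet? arr (N - 1)).getD 0 with hlast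
    set ss0 := (List.replicate K.toNat (0:Int)).set 0 last with hss0
    set tk0 := (List.replicate N.toNat false).set (N - 1).toNat true with htk0
    have hn1 : (N - 1).toNat = N.toNat - 1 := by omega
    have htk0' : tk0 = List.replicate (N.toNat - 1) false ++ [true] := by
      rw [htk0, hn1, ← replicate_set_last (N.toNat - 1),
          show N.toNat - 1 + 1 = N.toNat by omega]
    have hInv0 : pvInv arr K N ss0 tk0 0 := by
      refine ⟨hK, hN2, le_refl 0, by omega, by simp [hss0], by simp [htk0], hNlen, ?_⟩
      intro j h1 h2
      rw [hss0, List.getElem?_set_ne (show (0:Nat) ≠ j by omega)]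
      simp only [hss0, List.length_set, List.length_replicate] at h2
      simp [h2]
    rw [pvRecA_eq_solveB arr subset K N ss0 tk0 0 (N - 1) hInv0 (by omega) (by omega)]
    have e1 : pvAvail arr tk0 = arr.take (N - 1).toNat := by
      rw [htk0', hn1]
      exact pvAvail_entry arr (N.toNat - 1) (by omega)
    have e2 : (ss0[(0:Int).toNat]?).getD 0 = last := by
      rw [hss0]
      simp only [Int.toNat_zero]
      rw [List.getElem?_set_self (by simp only [List.length_replicate]; omega)]
      rfl
    have e3 : pvM tk0 (N - 1) = (N - 1).toNat := by
      simp only [pvM, show (N - 1 + 1).toNat = N.toNat by omega]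
      rw [show N.toNat = tk0.length by simp [htk0], List.take_length, htk0']
      simp [List.count_append]
    rw [e1, e2, e3, sub_zero, PySem.List.slice_to arr (by omega : (0:Int) ≤ N - 1)]
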